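-- pv_equiv track=rewrite | github.com/rtehok/perso-python | leetcode/2009_minimum-number-of-operations-to-make-array-continuous.py | minOperationsBinarySearch
-- ===== SOURCE A (Python) =====
-- from bisect import bisect_right
-- from typing import List
--
-- def minOperationsBinarySearch(nums: List[int]) -> int:
--     n = len(nums)
--     ans = n
--     new_nums = sorted(set(nums))
--
--     for i in range(len(new_nums)):
--         left = new_nums[i]
--         right = left + n - 1  # create an array of length n
--         j = bisect_right(new_nums, right)  # search index of leftmost element that is close to right
--         count = j - i  # number of changes to be made
--
--         ans = min(ans, n - count)
--
--     return ans
-- ===== SOURCE B (Python) =====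
-- def minOperationsBinarySearch(nums):
--     n = len(nums)
--     new_nums = sorted(set(nums))
--     best = 0
--     j = 0
--     for i in range(len(new_nums)):
--         while j < len(new_nums) and new_nums[j] <= new_nums[i] + n - 1:
--             j += 1
--         best = max(best, j - i)
--     return n - best
-- ===== Notes on version B (the rewrite author's own statement) =====
-- stated objective: alternative
-- what changed: Replaces the per-element binary search (bisect_right) with a single monotone right pointer swept once over the sorted unique values, tracking the best window size and returning n - best.
import Mathlib
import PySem

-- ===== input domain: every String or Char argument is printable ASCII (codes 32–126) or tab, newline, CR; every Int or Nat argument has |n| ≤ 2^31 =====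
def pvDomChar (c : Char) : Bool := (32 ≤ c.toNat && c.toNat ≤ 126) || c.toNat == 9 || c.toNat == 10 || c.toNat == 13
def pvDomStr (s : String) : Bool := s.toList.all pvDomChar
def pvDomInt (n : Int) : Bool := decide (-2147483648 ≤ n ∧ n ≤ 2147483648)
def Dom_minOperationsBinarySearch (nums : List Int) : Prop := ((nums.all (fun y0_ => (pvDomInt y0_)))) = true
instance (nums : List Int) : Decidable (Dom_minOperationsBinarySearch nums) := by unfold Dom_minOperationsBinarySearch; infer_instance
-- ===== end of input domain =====

-- B replaces A's per-element binary search (bisect_right) with a single monotone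
-- right-pointer sweep over the sorted unique values (alternative algorithm, same value).

-- ===== PORT A =====
def minOperationsBinarySearch (nums : List Int) : Int :=
  let n : Int := PySem.List.len nums
  let newNums : List Int := PySem.List.sorted (PySem.Set.ofList nums) (fun x => x)
  (PySem.List.pyRange 0 (PySem.List.len newNums) 1).foldl
    (fun ans i =>
      let left := PySem.List.pyGetD newNums i 0
      let right := left + n - 1
      let j : Int := (PySem.List.bisectRight newNums right : Int)
      let count := j - i
      min ans (n - count))
    n

-- ===== PORT B =====
-- the inner `while j < len(new_nums) and new_nums[j] <= t: j += 1` loop of Source B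
def pvAdvance (a : List Int) (t : Int) (j : Nat) : Nat :=
  if h : j < a.length then
    if a[j] ≤ t then pvAdvance a t (j + 1) else j
  else j
termination_by a.length - j

def minOperationsBinarySearch_alt (nums : List Int) : Int :=
  let n : Int := PySem.List.len nums
  let newNums : List Int := PySem.List.sorted (PySem.Set.ofList nums) (fun x => x)
  let st := (PySem.List.pyRange 0 (PySem.List.len newNums) 1).foldl
    (fun (st : Nat × Int) i =>
      let j := pvAdvance newNums (PySem.List.pyGetD newNums i 0 + n - 1) st.1
      (j, max st.2 ((j : Int) - i)))
    (0, 0)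
  n - st.2

-- ===== PRECONDITION & SPEC =====
def Spec_minOperationsBinarySearch (nums : List Int) (out : Int) : Prop := out = minOperationsBinarySearch_alt nums
instance (nums : List Int) (out : Int) : Decidable (Spec_minOperationsBinarySearch nums out) := by unfold Spec_minOperationsBinarySearch; infer_instance

-- ===== CLAIM (what is proved, stated in full; the proofs are below) =====
def Claim_equal_minOperationsBinarySearch : Prop := ∀ (nums : List Int), Dom_minOperationsBinarySearch nums → Spec_minOperationsBinarySearch nums (minOperationsBinarySearch nums)

-- ===== LEMMAS AND PROOFS =====

-- on a (≤)-sorted list, pvAdvance started at any point ≤ bisectRight lands exactly on bisectRight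
theorem pvAdvance_eq_bisectRight (a : List Int) (t : Int)
    (hs : a.Pairwise (· ≤ ·)) (j : Nat) (hj : j ≤ PySem.List.bisectRight a t) :
    pvAdvance a t j = PySem.List.bisectRight a t := by
  obtain ⟨hk, hlt, hge⟩ := PySem.List.bisectRight_spec a t hs
  revert hj
  fun_induction pvAdvance a t j with
  | case1 j h hle ih =>
    intro hj
    apply ih
    rcases Nat.lt_or_ge j (PySem.List.bisectRight a t) with h1 | h1
    · omega
    · exact absurd (hge j h h1) (by exact not_lt.mpr hle)
  | case2 j h hle =>
    intro hj
    rcases Nat.lt_or_ge j (PySem.List.bisectRight a t) with h1 | h1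
    · exact absurd (hlt j h h1) hle
    · omega
  | case3 j h =>
    intro hj
    omega

-- bisectRight is monotone in the threshold
theorem bisectRight_mono (a : List Int) (hs : a.Pairwise (· ≤ ·)) {t1 t2 : Int} (h : t1 ≤ t2) :
    PySem.List.bisectRight a t1 ≤ PySem.List.bisectRight a t2 := by
  obtain ⟨hk1, hlt1, hge1⟩ := PySem.List.bisectRight_spec a t1 hs
  obtain ⟨hk2, hlt2, hge2⟩ := PySem.List.bisectRight_spec a t2 hs
  by_contra hc
  rw [not_le] at hc
  have h1 : PySem.List.bisectRight a t2 < a.length := lt_of_lt_of_le hc hk1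
  have h2 := hlt1 _ h1 hc
  have h3 := hge2 _ h1 le_rfl
  linarith

-- a fold of min (n - g i) is n minus the fold of max (g i)
theorem min_fold_eq_sub_max_fold (n : Int) (g : Int → Int) :
    ∀ (l : List Int) (x : Int),
      l.foldl (fun ans i => min ans (n - g i)) x = n - l.foldl (fun b i => max b (g i)) (n - x) := by
  intro l
  induction l with
  | nil => intro x; simp
  | cons i l ih =>
    intro x
    simp only [List.foldl_cons]
    have h : n - min x (n - g i) = max (n - x) (g i) := by omega
    rw [ih, h]

theorem getD_mono_of_sorted (a : List Int) (hs : a.Pairwise (· ≤ ·)) {i j : Int}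
    (h0 : 0 ≤ i) (hij : i ≤ j) (hj : j < (a.length : Int)) :
    PySem.List.pyGetD a i 0 ≤ PySem.List.pyGetD a j 0 := by
  have hi : i < (a.length : Int) := lt_of_le_of_lt hij hj
  rw [PySem.List.pyGetD_eq_getElem a 0 h0 hi, PySem.List.pyGetD_eq_getElem a 0 (le_trans h0 hij) hj]
  rcases eq_or_lt_of_le hij with he | hl
  · subst he; exact le_rfl
  · exact (List.pairwise_iff_getElem.mp hs) i.toNat j.toNat (by omega) (by omega) (by omega)

-- B's paired fold computes, in its second component, the fold of max over the bisect counts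
theorem bfold (a : List Int) (n : Int) (hs : a.Pairwise (· ≤ ·)) :
    ∀ (fuel : Nat) (lo hi : Int), (hi - lo).toNat = fuel → 0 ≤ lo → hi ≤ (a.length : Int) →
    ∀ (j0 : Nat) (b : Int),
    (∀ i : Int, lo ≤ i → i < hi → j0 ≤ PySem.List.bisectRight a (PySem.List.pyGetD a i 0 + n - 1)) →
    ((PySem.List.pyRange lo hi 1).foldl
        (fun (st : Nat × Int) i =>
          let j := pvAdvance a (PySem.List.pyGetD a i 0 + n - 1) st.1
          (j, max st.2 ((j : Int) - i))) (j0, b)).2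
    = (PySem.List.pyRange lo hi 1).foldl
        (fun b i => max b ((PySem.List.bisectRight a (PySem.List.pyGetD a i 0 + n - 1) : Int) - i)) b := by
  intro fuel
  induction fuel with
  | zero =>
    intro lo hi hf h0 hhi j0 b hinv
    rw [PySem.List.pyRange_one_eq_nil (by omega)]; rfl
  | succ f ih =>
    intro lo hi hf h0 hhi j0 b hinv
    rcases lt_or_ge lo hi with hlt | hle
    · rw [PySem.List.pyRange_one_cons hlt]
      simp only [List.foldl_cons]
      have hj0 : j0 ≤ PySem.List.bisectRight a (PySem.List.pyGetD a lo 0 + n - 1) :=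
        hinv lo le_rfl hlt
      rw [pvAdvance_eq_bisectRight a _ hs j0 hj0]
      refine ih (lo + 1) hi (by omega) (by omega) hhi _ _ ?_
      intro i hi1 hi2
      refine bisectRight_mono a hs ?_
      have := getD_mono_of_sorted a hs h0 (by omega : lo ≤ i) (lt_of_lt_of_le hi2 hhi)
      omega
    · rw [PySem.List.pyRange_one_eq_nil hle]; rfl

-- ===== VERDICT (by name: the statement is the Claim_ definition above) =====
theorem minOperationsBinarySearch_spec : Claim_equal_minOperationsBinarySearch := by
  intro nums _
  unfold Spec_minOperationsBinarySearch minOperationsBinarySearch minOperationsBinarySearch_alt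
  dsimp only
  set a : List Int := PySem.List.sorted (PySem.Set.ofList nums) (fun x => x) with ha
  have hs : a.Pairwise (· ≤ ·) :=
    (PySem.List.sorted_ofList_pairwise_lt nums).imp (fun h => le_of_lt h)
  set n : Int := PySem.List.len nums with hn
  rw [min_fold_eq_sub_max_fold n
    (fun i => ((PySem.List.bisectRight a (PySem.List.pyGetD a i 0 + n - 1) : Int) - i))]
  rw [bfold a n hs (PySem.List.len a - 0).toNat 0 (PySem.List.len a) rfl le_rfl
    (by simp) 0 0 (fun i _ _ => Nat.zero_le _)]
  rw [sub_self]
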